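-- pv_equiv track=rewrite | github.com/VainExpert/UsefulLibs | Renamer/PhotoRename.py | gnomeSort
-- ===== SOURCE A (Python) =====
-- VideoEnds = [".mp4", ".3gp", ".mov", ".mpg", ".mpeg", ".swf", ".svd" ,".wmv" , ".flv", ".f4p", ".avi", ".flm", ".flt"]
--
-- def gnomeSort(dates, tempfiles):
--     n = len(dates)
--     index = 0
--     while index < n:
--         ending = tempfiles[index][-4:].lower()
--         if index == 0:
--             index = index + 1
--
--         elif dates[index] >= dates[index-1]:
--             index = index + 1
--
--         elif ending in VideoEnds:
--             index = index + 1
--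
--         else:
--             prevending = tempfiles[index-1][-4:].lower()
--             if prevending not in VideoEnds:
--                 dates[index], dates[index-1] = dates[index-1], dates[index]
--                 tempfiles[index], tempfiles[index-1] = tempfiles[index-1], tempfiles[index]
--                 index = index - 1
--
--             else:
--                 index = index + 1
--
--     return dates, tempfiles
-- ===== SOURCE B (Python) =====
-- VideoEnds = [".mp4", ".3gp", ".mov", ".mpg", ".mpeg", ".swf", ".svd" ,".wmv" , ".flv", ".f4p", ".avi", ".flm", ".flt"]
--
-- def gnomeSort(dates, tempfiles):
--     # Videos are fixed anchors; stably sort each run of non-video files by date.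
--     out = []
--     run = []
--     for d, f in zip(dates, tempfiles):
--         if f[-4:].lower() in VideoEnds:
--             run.sort(key=lambda p: p[0])
--             out.extend(run)
--             run = []
--             out.append((d, f))
--         else:
--             run.append((d, f))
--     run.sort(key=lambda p: p[0])
--     out.extend(run)
--     dates[:] = [d for d, _ in out]
--     tempfiles[:len(out)] = [f for _, f in out]
--     return dates, tempfiles
-- ===== Notes on version B (the rewrite author's own statement) =====
-- stated objective: faster
-- what changed: Replaces the quadratic gnome-sort walk (with video files acting as swap barriers) by a single pass that partitions the list into runs delimited by video-extension files and stably sorts each run by date with list.sort, keeping the video files in place.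
import Mathlib
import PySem

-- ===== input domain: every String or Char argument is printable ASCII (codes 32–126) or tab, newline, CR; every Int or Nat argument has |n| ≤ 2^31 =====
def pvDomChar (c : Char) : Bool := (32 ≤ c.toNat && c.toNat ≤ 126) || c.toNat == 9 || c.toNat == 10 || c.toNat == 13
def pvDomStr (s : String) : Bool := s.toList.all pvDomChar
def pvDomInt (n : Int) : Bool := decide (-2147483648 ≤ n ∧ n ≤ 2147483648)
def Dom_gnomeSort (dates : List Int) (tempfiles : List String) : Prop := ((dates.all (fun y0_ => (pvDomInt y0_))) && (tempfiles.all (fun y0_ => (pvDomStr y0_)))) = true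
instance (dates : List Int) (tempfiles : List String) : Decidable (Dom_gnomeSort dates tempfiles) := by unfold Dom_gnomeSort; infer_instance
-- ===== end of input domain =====

-- B replaces A's O(n^2) gnome walk (video files acting as swap barriers) by one pass that
-- stably sorts each run of non-video files by date, keeping video files fixed; the equivalence
-- proved is about the RETURN value (both Pythons also mutate their list arguments in place,
-- and B performs the same mutation as A on the admitted inputs).

-- ===== PORT A =====
def videoEnds : List String :=
  [".mp4", ".3gp", ".mov", ".mpg", ".mpeg", ".swf", ".svd", ".wmv", ".flv", ".f4p", ".avi", ".flm", ".flt"]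

-- number of inversions of a list of dates (termination measure for the gnome loop)
def invCount : List Int → Nat
  | [] => 0
  | x :: xs => xs.countP (fun y => decide (y < x)) + invCount xs

theorem invCount_middle_swap (u v : List Int) (a b : Int) (h : b < a) :
    invCount (u ++ b :: a :: v) < invCount (u ++ a :: b :: v) := by
  induction u with
  | nil =>
    simp only [List.nil_append, invCount, List.countP_cons]
    have : ¬ (a < b) := by omega
    simp [h, this]
    omega
  | cons z u ih =>
    simp only [List.cons_append, invCount]
    have hperm : (u ++ b :: a :: v).countP (fun y => decide (y < z))
        = (u ++ a :: b :: v).countP (fun y => decide (y < z)) := by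
      simp [List.countP_append, List.countP_cons]; omega
    omega

theorem set_at_length {α : Type} (u w : List α) (a b : α) :
    (u ++ a :: w).set u.length b = u ++ b :: w := by
  induction u with
  | nil => rfl
  | cons z u ih => simp [List.set, ih]

theorem eq_take_middle (l : List Int) (i : Nat) (h0 : i ≠ 0) (h : i < l.length) :
    l = l.take (i-1) ++ l.getD (i-1) 0 :: l.getD i 0 :: l.drop (i+1) := by
  have h1 : i - 1 < l.length := by omega
  have h2 : i - 1 + 1 = i := by omega
  have hd : l.drop (i-1) = l.getD (i-1) 0 :: l.drop i := by
    rw [List.getD_eq_getElem l 0 h1, List.drop_eq_getElem_cons h1, h2]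
  have hd2 : l.drop i = l.getD i 0 :: l.drop (i+1) := by
    rw [List.getD_eq_getElem l 0 h, List.drop_eq_getElem_cons h]
  conv_lhs => rw [← List.take_append_drop (i-1) l]
  rw [hd, hd2]

theorem set_swap_shape {α : Type} (u w : List α) (a b : α) :
    ((u ++ a :: b :: w).set (u.length+1) a).set u.length b = u ++ b :: a :: w := by
  have h1 : (u ++ a :: b :: w).set (u.length+1) a = u ++ a :: a :: w := by
    have := set_at_length (u ++ [a]) w b a
    simpa using this
  rw [h1]
  exact set_at_length u (a :: w) a b

theorem invCount_swap (l : List Int) (i : Nat) (h0 : i ≠ 0) (h : i < l.length)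
    (hlt : l.getD i 0 < l.getD (i-1) 0) :
    invCount ((l.set i (l.getD (i-1) 0)).set (i-1) (l.getD i 0)) < invCount l := by
  set u := l.take (i-1) with hu
  set a := l.getD (i-1) 0 with ha
  set b := l.getD i 0 with hb
  set w := l.drop (i+1) with hw
  have heq : l = u ++ a :: b :: w := eq_take_middle l i h0 h
  have hlen : u.length = i - 1 := by
    rw [hu]; simp [List.length_take]; omega
  have hi : i = u.length + 1 := by omega
  have him : i - 1 = u.length := by omega
  rw [heq, hi]
  simp only [Nat.add_sub_cancel]
  rw [set_swap_shape]
  exact invCount_middle_swap _ _ _ _ hlt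

-- literal port of A's while-loop; n = len(dates) is dates.length (List.set preserves length).
-- On tempfiles accesses where Python raises IndexError the pyGet? is none and the loop bails
-- out with the current state (unreachable under Pre_).
def gnomeLoopA (dates : List Int) (tfs : List String) (index : Nat) : List Int × List String :=
  if hlt : index < dates.length then
    match PySem.List.pyGet? tfs (index : Int) with
    | none => (dates, tfs)
    | some ti =>
      let ending := PySem.Str.lower (PySem.Str.slice ti (some (-4)) none)
      if index = 0 then gnomeLoopA dates tfs (index + 1)
      else if dates.getD (index-1) 0 ≤ dates.getD index 0 then gnomeLoopA dates tfs (index + 1)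
      else if videoEnds.contains ending then gnomeLoopA dates tfs (index + 1)
      else
        match PySem.List.pyGet? tfs ((index : Int) - 1) with
        | none => (dates, tfs)
        | some tp =>
          let prevending := PySem.Str.lower (PySem.Str.slice tp (some (-4)) none)
          if !(videoEnds.contains prevending) then
            gnomeLoopA ((dates.set index (dates.getD (index-1) 0)).set (index-1) (dates.getD index 0))
                       ((tfs.set index tp).set (index-1) ti) (index - 1)
          else gnomeLoopA dates tfs (index + 1)
  else (dates, tfs)
termination_by (invCount dates, dates.length - index)
decreasing_by
  all_goals first
    | exact Prod.Lex.right _ (by omega)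
    | (apply Prod.Lex.left; apply invCount_swap <;> omega)

def gnomeSort (dates : List Int) (tempfiles : List String) : List Int × List String :=
  gnomeLoopA dates tempfiles 0

-- ===== PORT B =====
def isVid (s : String) : Bool :=
  videoEnds.contains (PySem.Str.lower (PySem.Str.slice s (some (-4)) none))

def sortedRun (r : List (Int × String)) : List (Int × String) :=
  PySem.List.sorted r (fun q => q.1) false

def bStep (acc : List (Int × String) × List (Int × String)) (p : Int × String) :
    List (Int × String) × List (Int × String) :=
  if isVid p.2 then (acc.1 ++ sortedRun acc.2 ++ [p], []) else (acc.1, acc.2 ++ [p])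

def gnomeSort_alt (dates : List Int) (tempfiles : List String) : List Int × List String :=
  let pairs := dates.zip tempfiles
  let orun := pairs.foldl bStep ([], [])
  let out := orun.1 ++ sortedRun orun.2
  (out.map Prod.fst, out.map Prod.snd ++ tempfiles.drop out.length)

-- ===== PRECONDITION & SPEC =====
-- A raises IndexError (reading tempfiles[index]) as soon as len(tempfiles) < len(dates); Pre_ excludes exactly those inputs.
def Pre_gnomeSort (dates : List Int) (tempfiles : List String) : Prop :=
  dates.length ≤ tempfiles.length
instance (dates : List Int) (tempfiles : List String) : Decidable (Pre_gnomeSort dates tempfiles) := by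
  unfold Pre_gnomeSort; infer_instance

def pvWitness_gnomeSort : List Int × List String :=
  ([3, 1, 2, 5, 4], ["a.jpg", "b.png", "c.mp4", "d.jpg", "e.jpg"])

def Spec_gnomeSort (dates : List Int) (tempfiles : List String) (out : List Int × List String) : Prop :=
  out = gnomeSort_alt dates tempfiles
instance (dates : List Int) (tempfiles : List String) (out : List Int × List String) :
    Decidable (Spec_gnomeSort dates tempfiles out) := by unfold Spec_gnomeSort; infer_instance

-- ===== CLAIM (what is proved, stated in full; the proofs are below) =====
def Claim_equal_gnomeSort : Prop := ∀ (dates : List Int) (tempfiles : List String), Dom_gnomeSort dates tempfiles → Pre_gnomeSort dates tempfiles → Spec_gnomeSort dates tempfiles (gnomeSort dates tempfiles)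

-- ===== LEMMAS AND PROOFS =====

theorem getD_at_length {α : Type} [Inhabited α] (u w : List α) (a : α) :
    (u ++ a :: w).getD u.length default = a := by
  simp [List.getD, List.getElem?_append_right (Nat.le_refl _)]

theorem getD_map_fst (l : List (Int × String)) (i : Nat) (h : i < l.length) :
    (l.map Prod.fst).getD i 0 = (l.getD i default).1 := by
  rw [List.getD_eq_getElem _ _ (by simpa using h), List.getD_eq_getElem _ _ h]
  simp

theorem invCount_swap_pairs (l : List (Int × String)) (i : Nat) (h0 : i ≠ 0) (h : i < l.length)
    (hlt : (l.getD i default).1 < (l.getD (i-1) default).1) :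
    invCount (((l.set i (l.getD (i-1) default)).set (i-1) (l.getD i default)).map Prod.fst)
      < invCount (l.map Prod.fst) := by
  simp only [List.map_set]
  rw [← getD_map_fst l i h, ← getD_map_fst l (i-1) (by omega)]
  apply invCount_swap
  · omega
  · simpa using h
  · rw [getD_map_fst l i h, getD_map_fst l (i-1) (by omega)]; exact hlt

-- gnome loop on the zipped (date, file) pairs, mirroring gnomeLoopA
def gnomeLoopP (l : List (Int × String)) (index : Nat) : List (Int × String) :=
  if index < l.length then
    if index = 0 then gnomeLoopP l (index + 1)
    else if (l.getD (index-1) default).1 ≤ (l.getD index default).1 then gnomeLoopP l (index + 1)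
    else if isVid (l.getD index default).2 then gnomeLoopP l (index + 1)
    else if isVid (l.getD (index-1) default).2 then gnomeLoopP l (index + 1)
    else gnomeLoopP ((l.set index (l.getD (index-1) default)).set (index-1) (l.getD index default)) (index - 1)
  else l
termination_by (invCount (l.map Prod.fst), l.length - index)
decreasing_by
  all_goals first
    | exact Prod.Lex.right _ (by omega)
    | exact Prod.Lex.left _ _ (invCount_swap_pairs l index (by omega) (by omega) (by omega))

-- "settled": every adjacent pair is in order or involves a video file
def okPair (a b : Int × String) : Prop := a.1 ≤ b.1 ∨ isVid a.2 = true ∨ isVid b.2 = true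

def Settled (P : List (Int × String)) : Prop := List.IsChain okPair P

-- insertion of x into P from the right, stopping at a video file or a date ≤ x.1
def insRunR (x : Int × String) : List (Int × String) → List (Int × String)
  | [] => [x]
  | y :: ys => if isVid y.2 || decide (y.1 ≤ x.1) then x :: y :: ys else y :: insRunR x ys

def insRun (x : Int × String) (P : List (Int × String)) : List (Int × String) :=
  (insRunR x P.reverse).reverse

def stepS (P : List (Int × String)) (x : Int × String) : List (Int × String) :=
  if isVid x.2 then P ++ [x] else insRun x P

theorem insRun_nil (x : Int × String) : insRun x [] = [x] := rfl

theorem insRun_concat (x y : Int × String) (P : List (Int × String)) :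
    insRun x (P ++ [y])
      = if isVid y.2 || decide (y.1 ≤ x.1) then P ++ [y, x] else insRun x P ++ [y] := by
  unfold insRun
  rw [List.reverse_append]
  simp only [List.reverse_cons, List.reverse_nil, List.nil_append, List.singleton_append]
  rw [insRunR]
  split
  · simp
  · simp

theorem length_insRunR (x : Int × String) (l : List (Int × String)) :
    (insRunR x l).length = l.length + 1 := by
  induction l with
  | nil => rfl
  | cons y ys ih =>
    rw [insRunR]
    split
    · simp
    · simp [ih]

theorem length_insRun (x : Int × String) (P : List (Int × String)) :
    (insRun x P).length = P.length + 1 := by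
  simp [insRun, length_insRunR]

theorem getLast?_insRun (x : Int × String) (P : List (Int × String)) :
    (insRun x P).getLast? = some x ∨ (insRun x P).getLast? = P.getLast? := by
  induction P using List.reverseRecOn with
  | nil => left; rfl
  | append_singleton P y ih =>
    rw [insRun_concat]
    split
    · left
      rw [show P ++ [y, x] = (P ++ [y]) ++ [x] by simp]
      exact List.getLast?_concat
    · right
      rw [List.getLast?_concat, List.getLast?_concat]

theorem settled_insRun (x : Int × String) (P : List (Int × String)) (hP : Settled P) :
    Settled (insRun x P) := by
  induction P using List.reverseRecOn with
  | nil => exact List.isChain_singleton x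
  | append_singleton P y ih =>
    have hP' : Settled P := (List.isChain_append.mp hP).1
    have hjun : ∀ a ∈ P.getLast?, okPair a y := by
      have h := (List.isChain_append.mp hP).2.2
      intro a ha
      exact h a ha y rfl
    rw [insRun_concat]
    unfold Settled at *
    split
    · rename_i hstop
      rw [show P ++ [y, x] = (P ++ [y]) ++ [x] by simp]
      rw [List.isChain_append]
      refine ⟨hP, List.isChain_singleton x, ?_⟩
      intro a ha b hb
      rw [List.getLast?_concat] at ha
      simp at ha hb
      subst ha; subst hb
      rcases Bool.or_eq_true_iff.mp hstop with hv | hle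
      · exact Or.inr (Or.inl hv)
      · exact Or.inl (by simpa using hle)
    · rename_i hcont
      have hcont' := hcont
      simp only [Bool.or_eq_true, decide_eq_true_eq, not_or, Bool.not_eq_true] at hcont'
      rw [List.isChain_append]
      refine ⟨ih hP', List.isChain_singleton y, ?_⟩
      intro a ha b hb
      simp at hb; subst hb
      rcases getLast?_insRun x P with hg | hg
      · rw [hg] at ha; simp at ha; subst ha
        exact Or.inl (by omega)
      · rw [hg] at ha
        exact hjun a ha

theorem settled_step (P : List (Int × String)) (x : Int × String) (hP : Settled P) :
    Settled (stepS P x) := by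
  unfold Settled at *
  rw [stepS]
  split
  · rename_i hv
    rw [List.isChain_append]
    refine ⟨hP, List.isChain_singleton x, ?_⟩
    intro a _ b hb
    simp at hb; subst hb
    exact Or.inr (Or.inr hv)
  · exact settled_insRun x P hP

theorem length_stepS (P : List (Int × String)) (x : Int × String) :
    (stepS P x).length = P.length + 1 := by
  rw [stepS]; split
  · simp
  · exact length_insRun x P

theorem getD_append_left {α : Type} [Inhabited α] (L rest : List α) (i : Nat) (h : i < L.length) :
    (L ++ rest).getD i default = L.getD i default := by
  rw [List.getD_eq_getElem _ _ (by simp; omega), List.getD_eq_getElem _ _ h]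
  exact List.getElem_append_left h

theorem okStep (L rest : List (Int × String)) (i : Nat) (h0 : i ≠ 0) (hi : i < L.length)
    (hok : okPair (L.getD (i-1) default) (L.getD i default)) :
    gnomeLoopP (L ++ rest) i = gnomeLoopP (L ++ rest) (i + 1) := by
  rw [gnomeLoopP]
  have hlen : i < (L ++ rest).length := by simp; omega
  rw [if_pos hlen, if_neg h0]
  rw [getD_append_left L rest i hi, getD_append_left L rest (i-1) (by omega)]
  by_cases h1 : (L.getD (i-1) default).1 ≤ (L.getD i default).1
  · rw [if_pos h1]
  · rw [if_neg h1]
    by_cases h2 : isVid (L.getD i default).2 = true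
    · rw [if_pos h2]
    · rw [if_neg h2]
      have h3 : isVid (L.getD (i-1) default).2 = true := by
        rcases hok with h | h | h
        · exact absurd h h1
        · exact h
        · exact absurd h h2
      rw [if_pos h3]

theorem settled_ok_adj (L : List (Int × String)) (hL : Settled L) (i : Nat)
    (h0 : i ≠ 0) (hi : i < L.length) :
    okPair (L.getD (i-1) default) (L.getD i default) := by
  have h := List.isChain_iff_getElem.mp hL (i-1) (by omega)
  rw [List.getD_eq_getElem _ _ (by omega : i - 1 < L.length), List.getD_eq_getElem _ _ hi]
  simpa [show i - 1 + 1 = i by omega] using h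

theorem step_sim (x : Int × String) (P rest : List (Int × String)) (hP : Settled P) :
    gnomeLoopP (P ++ x :: rest) P.length = gnomeLoopP (stepS P x ++ rest) (P.length + 1) := by
  induction P using List.reverseRecOn generalizing rest with
  | nil =>
    have hs : stepS [] x = [x] := by
      rw [stepS]; split
      · rfl
      · rfl
    rw [hs]
    simp only [List.nil_append, List.singleton_append, List.length_nil]
    rw [gnomeLoopP]
    rw [if_pos (by simp), if_pos rfl]
  | append_singleton P y ih =>
    have hP' : Settled P := (List.isChain_append.mp hP).1
    have hlenP : (P ++ [y]).length = P.length + 1 := by simp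
    have hxpos : ((P ++ [y]) ++ x :: rest).getD (P ++ [y]).length default = x := by
      rw [show (P ++ [y]) ++ x :: rest = (P ++ [y]) ++ x :: rest from rfl]
      exact getD_at_length (P ++ [y]) rest x
    have hypos : ((P ++ [y]) ++ x :: rest).getD ((P ++ [y]).length - 1) default = y := by
      rw [show (P ++ [y]) ++ x :: rest = P ++ y :: (x :: rest) by simp]
      rw [hlenP]
      simp only [Nat.add_sub_cancel]
      exact getD_at_length P (x :: rest) y
    rw [gnomeLoopP]
    rw [if_pos (by simp)]
    rw [if_neg (by simp)]
    rw [hxpos, hypos]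
    by_cases h1 : y.1 ≤ x.1
    · rw [if_pos h1]
      have hstep : stepS (P ++ [y]) x = (P ++ [y]) ++ [x] := by
        rw [stepS]; split
        · rfl
        · rw [insRun_concat, if_pos (by simp [h1])]
          simp
      rw [hstep]
      rw [show ((P ++ [y]) ++ [x]) ++ rest = (P ++ [y]) ++ x :: rest by simp]
    · rw [if_neg h1]
      by_cases h2 : isVid x.2 = true
      · rw [if_pos h2]
        have hstep : stepS (P ++ [y]) x = (P ++ [y]) ++ [x] := by
          rw [stepS, if_pos h2]
        rw [hstep]
        rw [show ((P ++ [y]) ++ [x]) ++ rest = (P ++ [y]) ++ x :: rest by simp]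
      · rw [if_neg h2]
        by_cases h3 : isVid y.2 = true
        · rw [if_pos h3]
          have hstep : stepS (P ++ [y]) x = (P ++ [y]) ++ [x] := by
            rw [stepS, if_neg (by simp [h2]), insRun_concat, if_pos (by simp [h3])]
            simp
          rw [hstep]
          rw [show ((P ++ [y]) ++ [x]) ++ rest = (P ++ [y]) ++ x :: rest by simp]
        · rw [if_neg h3]
          -- swap case
          have hswap : (((P ++ [y]) ++ x :: rest).set (P ++ [y]).length y).set ((P ++ [y]).length - 1) x
              = P ++ x :: y :: rest := by
            rw [set_at_length (P ++ [y]) rest x y]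
            rw [show (P ++ [y]) ++ y :: rest = P ++ y :: (y :: rest) by simp]
            rw [hlenP]
            simp only [Nat.add_sub_cancel]
            rw [show P.length = P.length from rfl]
            exact set_at_length P (y :: rest) y x
          rw [hswap, hlenP]
          simp only [Nat.add_sub_cancel]
          rw [ih (y :: rest) hP']
          have hins : stepS (P ++ [y]) x = insRun x P ++ [y] := by
            rw [stepS, if_neg (by simp [h2]), insRun_concat, if_neg (by simp [h3, h1])]
          have hinsP : stepS P x = insRun x P := by
            rw [stepS, if_neg (by simp [h2])]
          rw [hinsP, hins]
          have heq : (insRun x P ++ [y]) ++ rest = insRun x P ++ y :: rest := by simp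
          rw [heq]
          have hlenins : (insRun x P).length = P.length + 1 := length_insRun x P
          have hsettled : Settled (insRun x P ++ [y]) := by
            have h4 : insRun x P ++ [y] = insRun x (P ++ [y]) := by
              rw [insRun_concat, if_neg (by simp [h3, h1])]
            rw [h4]
            exact settled_insRun x (P ++ [y]) hP
          have hok := settled_ok_adj (insRun x P ++ [y]) hsettled (P.length + 1)
            (by omega) (by simp [hlenins])
          have hstep2 := okStep (insRun x P ++ [y]) rest (P.length + 1) (by omega)
            (by simp [hlenins]) hok
          rw [heq] at hstep2
          exact hstep2

theorem main_sim (rest : List (Int × String)) : ∀ P, Settled P →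
    gnomeLoopP (P ++ rest) P.length = rest.foldl stepS P := by
  induction rest with
  | nil =>
    intro P hP
    simp only [List.append_nil, List.foldl_nil]
    rw [gnomeLoopP, if_neg (lt_irrefl P.length)]
  | cons x rest ih =>
    intro P hP
    simp only [List.foldl_cons]
    rw [step_sim x P rest hP]
    rw [← length_stepS P x]
    exact ih (stepS P x) (settled_step P x hP)

theorem insRun_append_closed (x : Int × String) (out : List (Int × String))
    (hout : ∀ a ∈ out.getLast?, isVid a.2 = true) (r : List (Int × String)) :
    insRun x (out ++ r) = out ++ insRun x r := by
  induction r using List.reverseRecOn with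
  | nil =>
    simp only [List.append_nil, insRun_nil]
    induction out using List.reverseRecOn with
    | nil => rfl
    | append_singleton o a _ =>
      have hva : isVid a.2 = true := hout a (by rw [List.getLast?_concat]; rfl)
      rw [insRun_concat, if_pos (by simp [hva])]
      simp
  | append_singleton r z ihr =>
    rw [show out ++ (r ++ [z]) = (out ++ r) ++ [z] by simp]
    rw [insRun_concat, insRun_concat]
    split
    · simp
    · rw [ihr]; simp

theorem insertBy_append_single (before : (Int × String) → (Int × String) → Bool)
    (x z : Int × String) (hz : before x z = true) (ys : List (Int × String)) :
    PySem.List.insertBy before x (ys ++ [z]) = PySem.List.insertBy before x ys ++ [z] := by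
  induction ys with
  | nil => simp [PySem.List.insertBy, hz]
  | cons y ys ih =>
    rw [List.cons_append, PySem.List.insertBy, PySem.List.insertBy]
    split
    · simp
    · rw [ih]; simp

theorem insRun_eq_insertBy (x : Int × String) (S : List (Int × String))
    (hs : S.Pairwise (fun a b => a.1 ≤ b.1)) (hnv : ∀ p ∈ S, isVid p.2 = false) :
    insRun x S = PySem.List.insertBy (fun a b => decide (a.1 < b.1)) x S := by
  induction S using List.reverseRecOn with
  | nil => rfl
  | append_singleton S z ih =>
    have hS : S.Pairwise (fun a b => a.1 ≤ b.1) := hs.sublist (by simp)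
    have hall : ∀ y ∈ S, y.1 ≤ z.1 := by
      intro y hy
      exact (List.pairwise_append.mp hs).2.2 y hy z (by simp)
    have hvz : isVid z.2 = false := hnv z (by simp)
    rw [insRun_concat]
    by_cases hle : z.1 ≤ x.1
    · rw [if_pos (by simp [hvz, hle])]
      rw [PySem.List.insertBy_of_forall_not_before]
      · simp
      · intro y hy
        simp at hy
        rcases hy with hy | hy
        · have := hall y hy; simp; omega
        · subst hy; simp; omega
    · rw [if_neg (by simp [hvz, hle])]
      rw [insertBy_append_single _ _ _ (by simp; omega)]
      rw [ih hS (fun p hp => hnv p (by simp [hp]))]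

theorem sortedRun_concat (run : List (Int × String)) (x : Int × String) :
    sortedRun (run ++ [x])
      = PySem.List.insertBy (fun a b => decide (a.1 < b.1)) x (sortedRun run) := by
  rw [sortedRun, sortedRun, PySem.List.sorted_eq_foldl_insertBy, List.foldl_concat,
    ← PySem.List.sorted_eq_foldl_insertBy]

theorem b_sim (xs : List (Int × String)) : ∀ out run,
    (∀ a ∈ out.getLast?, isVid a.2 = true) → (∀ p ∈ run, isVid p.2 = false) →
    xs.foldl stepS (out ++ sortedRun run)
      = (xs.foldl bStep (out, run)).1 ++ sortedRun (xs.foldl bStep (out, run)).2 := by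
  induction xs with
  | nil => intro out run _ _; rfl
  | cons x xs ih =>
    intro out run hout hrun
    simp only [List.foldl_cons]
    by_cases hvx : isVid x.2 = true
    · rw [show bStep (out, run) x = (out ++ sortedRun run ++ [x], []) by rw [bStep, if_pos hvx]]
      rw [show stepS (out ++ sortedRun run) x = (out ++ sortedRun run) ++ [x] by rw [stepS, if_pos hvx]]
      have := ih (out ++ sortedRun run ++ [x]) []
        (by intro a ha; rw [show out ++ sortedRun run ++ [x] = (out ++ sortedRun run) ++ [x] by simp,
              List.getLast?_concat] at ha; simp at ha; subst ha; exact hvx)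
        (by intro p hp; simp at hp)
      rw [show (out ++ sortedRun run ++ [x]) ++ sortedRun [] = (out ++ sortedRun run) ++ [x] by
        simp [sortedRun]; rfl] at this
      exact this
    · rw [show bStep (out, run) x = (out, run ++ [x]) by rw [bStep, if_neg hvx]]
      have hnvS : ∀ p ∈ sortedRun run, isVid p.2 = false := by
        intro p hp
        exact hrun p ((PySem.List.mem_sorted run _ false p).mp hp)
      have hstep : stepS (out ++ sortedRun run) x = out ++ sortedRun (run ++ [x]) := by
        rw [stepS, if_neg (by simp [hvx])]
        rw [insRun_append_closed x out hout (sortedRun run)]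
        rw [insRun_eq_insertBy x (sortedRun run) (PySem.List.sorted_pairwise run _) hnvS]
        rw [← sortedRun_concat]
      rw [hstep]
      exact ih out (run ++ [x]) hout
        (by intro p hp; simp at hp; rcases hp with hp | hp
            · exact hrun p hp
            · subst hp; simpa using hvx)

theorem pyGet?_map_snd (l : List (Int × String)) (tail : List String) (i : Nat)
    (h : i < l.length) :
    PySem.List.pyGet? (l.map Prod.snd ++ tail) (i : Int) = some (l.getD i default).2 := by
  rw [PySem.List.pyGet?_natCast]
  rw [List.getElem?_append_left (by simpa using h)]
  rw [List.getElem?_map]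
  rw [List.getElem?_eq_getElem h]
  rw [List.getD_eq_getElem _ _ h]
  rfl

theorem gnomeLoopA_eq0 (dates : List Int) (tfs : List String) (ti : String)
    (h : 0 < dates.length) (hti : PySem.List.pyGet? tfs ((0:Nat) : Int) = some ti) :
    gnomeLoopA dates tfs 0 = gnomeLoopA dates tfs 1 := by
  conv_lhs => rw [gnomeLoopA]
  rw [dif_pos h, hti]
  rfl

theorem gnomeLoopA_eqS (dates : List Int) (tfs : List String) (index : Nat) (ti tp : String)
    (h : index < dates.length)
    (hti : PySem.List.pyGet? tfs (index : Int) = some ti)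
    (htp : PySem.List.pyGet? tfs ((index : Int) - 1) = some tp) :
    gnomeLoopA dates tfs index =
      (if index = 0 then gnomeLoopA dates tfs (index + 1)
       else if dates.getD (index-1) 0 ≤ dates.getD index 0 then gnomeLoopA dates tfs (index + 1)
       else if videoEnds.contains (PySem.Str.lower (PySem.Str.slice ti (some (-4)) none)) then
         gnomeLoopA dates tfs (index + 1)
       else if !(videoEnds.contains (PySem.Str.lower (PySem.Str.slice tp (some (-4)) none))) then
         gnomeLoopA ((dates.set index (dates.getD (index-1) 0)).set (index-1) (dates.getD index 0))
                    ((tfs.set index tp).set (index-1) ti) (index - 1)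
       else gnomeLoopA dates tfs (index + 1)) := by
  conv_lhs => rw [gnomeLoopA]
  rw [dif_pos h, hti, htp]

theorem cast_pred (i : Nat) (h0 : ¬ i = 0) : (i : Int) - 1 = ((i - 1 : Nat) : Int) := by omega

set_option maxHeartbeats 2000000 in
theorem bridge (l : List (Int × String)) (tail : List String) (i : Nat) :
    gnomeLoopA (l.map Prod.fst) (l.map Prod.snd ++ tail) i
      = ((gnomeLoopP l i).map Prod.fst, (gnomeLoopP l i).map Prod.snd ++ tail) := by
  induction l, i using gnomeLoopP.induct with
  | case1 l h0 ih =>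
    rw [gnomeLoopA_eq0 (l.map Prod.fst) (l.map Prod.snd ++ tail) ((l.getD 0 default).2)
      (by simpa using h0) (pyGet?_map_snd l tail 0 h0)]
    conv_rhs => rw [gnomeLoopP]
    rw [if_pos h0, if_pos rfl]
    exact ih
  | case2 l i hlt h0 hle ih =>
    rw [gnomeLoopA_eqS (l.map Prod.fst) (l.map Prod.snd ++ tail) i ((l.getD i default).2)
      ((l.getD (i-1) default).2) (by simpa using hlt) (pyGet?_map_snd l tail i hlt)
      (by rw [cast_pred i h0]; exact pyGet?_map_snd l tail (i-1) (by omega))]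
    rw [if_neg h0]
    rw [getD_map_fst l i hlt, getD_map_fst l (i-1) (by omega)]
    rw [if_pos hle]
    conv_rhs => rw [gnomeLoopP]
    rw [if_pos hlt, if_neg h0, if_pos hle]
    exact ih
  | case3 l i hlt h0 hle hvx ih =>
    have hvx' : videoEnds.contains (PySem.Str.lower (PySem.Str.slice ((l.getD i default).2) (some (-4)) none)) = true := by
      simpa [isVid] using hvx
    rw [gnomeLoopA_eqS (l.map Prod.fst) (l.map Prod.snd ++ tail) i ((l.getD i default).2)
      ((l.getD (i-1) default).2) (by simpa using hlt) (pyGet?_map_snd l tail i hlt)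
      (by rw [cast_pred i h0]; exact pyGet?_map_snd l tail (i-1) (by omega))]
    rw [if_neg h0]
    rw [getD_map_fst l i hlt, getD_map_fst l (i-1) (by omega)]
    rw [if_neg hle]
    rw [if_pos hvx']
    conv_rhs => rw [gnomeLoopP]
    rw [if_pos hlt, if_neg h0, if_neg hle, if_pos hvx]
    exact ih
  | case4 l i hlt h0 hle hvx ihvy ih =>
    have hvx' : videoEnds.contains (PySem.Str.lower (PySem.Str.slice ((l.getD i default).2) (some (-4)) none)) = false := by
      simpa [isVid, Bool.not_eq_true] using hvx
    have hvy' : videoEnds.contains (PySem.Str.lower (PySem.Str.slice ((l.getD (i-1) default).2) (some (-4)) none)) = true := by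
      simpa [isVid] using ihvy
    rw [gnomeLoopA_eqS (l.map Prod.fst) (l.map Prod.snd ++ tail) i ((l.getD i default).2)
      ((l.getD (i-1) default).2) (by simpa using hlt) (pyGet?_map_snd l tail i hlt)
      (by rw [cast_pred i h0]; exact pyGet?_map_snd l tail (i-1) (by omega))]
    rw [if_neg h0]
    rw [getD_map_fst l i hlt, getD_map_fst l (i-1) (by omega)]
    rw [if_neg hle]
    rw [if_neg (by simp only [hvx']; decide)]
    rw [if_neg (by simp only [hvy']; decide)]
    conv_rhs => rw [gnomeLoopP]
    rw [if_pos hlt, if_neg h0, if_neg hle, if_neg hvx, if_pos ihvy]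
    exact ih
  | case5 l i hlt h0 hle hvx ihvy ih =>
    have hvx' : videoEnds.contains (PySem.Str.lower (PySem.Str.slice ((l.getD i default).2) (some (-4)) none)) = false := by
      simpa [isVid, Bool.not_eq_true] using hvx
    have hvy' : videoEnds.contains (PySem.Str.lower (PySem.Str.slice ((l.getD (i-1) default).2) (some (-4)) none)) = false := by
      simpa [isVid, Bool.not_eq_true] using ihvy
    rw [gnomeLoopA_eqS (l.map Prod.fst) (l.map Prod.snd ++ tail) i ((l.getD i default).2)
      ((l.getD (i-1) default).2) (by simpa using hlt) (pyGet?_map_snd l tail i hlt)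
      (by rw [cast_pred i h0]; exact pyGet?_map_snd l tail (i-1) (by omega))]
    rw [if_neg h0]
    rw [getD_map_fst l i hlt, getD_map_fst l (i-1) (by omega)]
    rw [if_neg hle]
    rw [if_neg (by simp only [hvx']; decide)]
    rw [if_pos (by simp only [hvy']; decide)]
    have hd : ((l.map Prod.fst).set i ((l.getD (i-1) default).1)).set (i-1) ((l.getD i default).1)
        = ((l.set i (l.getD (i-1) default)).set (i-1) (l.getD i default)).map Prod.fst := by
      rw [List.map_set, List.map_set]
    have ht : ((l.map Prod.snd ++ tail).set i ((l.getD (i-1) default).2)).set (i-1) ((l.getD i default).2)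
        = ((l.set i (l.getD (i-1) default)).set (i-1) (l.getD i default)).map Prod.snd ++ tail := by
      rw [List.set_append_left _ _ (by simpa using hlt)]
      rw [List.set_append_left _ _ (by simp; omega)]
      rw [List.map_set, List.map_set]
    rw [hd, ht]
    conv_rhs => rw [gnomeLoopP]
    rw [if_pos hlt, if_neg h0, if_neg hle, if_neg hvx, if_neg ihvy]
    exact ih
  | case6 l i hlt =>
    rw [gnomeLoopA]
    rw [dif_neg (by simpa using hlt)]
    conv_rhs => rw [gnomeLoopP]
    rw [if_neg hlt]

theorem length_foldl_bStep (xs : List (Int × String)) : ∀ o r,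
    (xs.foldl bStep (o, r)).1.length + (xs.foldl bStep (o, r)).2.length
      = o.length + r.length + xs.length := by
  induction xs with
  | nil => intro o r; simp
  | cons x xs ih =>
    intro o r
    simp only [List.foldl_cons]
    rw [bStep]
    split
    · rw [ih]
      simp [sortedRun, PySem.List.length_sorted]
      omega
    · rw [ih]
      simp
      omega

theorem map_snd_zip_take : ∀ (a : List Int) (b : List String), a.length ≤ b.length →
    (a.zip b).map Prod.snd = b.take a.length := by
  intro a
  induction a with
  | nil => intro b _; simp
  | cons x a ih =>
    intro b hb
    cases b with
    | nil => simp at hb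
    | cons y b =>
      simp only [List.zip_cons_cons, List.map_cons, List.length_cons, List.take_succ_cons]
      rw [ih b (by simpa using hb)]

theorem settled_nil : Settled [] := List.isChain_nil

-- ===== VERDICT (by name: the statement is the Claim_ definition above) =====
theorem gnomeSort_spec : Claim_equal_gnomeSort := by
  intro dates tempfiles _hdom hpre
  unfold Spec_gnomeSort
  have hpre' : dates.length ≤ tempfiles.length := hpre
  have hfst : (dates.zip tempfiles).map Prod.fst = dates := List.map_fst_zip hpre'
  have htf : (dates.zip tempfiles).map Prod.snd ++ tempfiles.drop dates.length = tempfiles := by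
    rw [map_snd_zip_take dates tempfiles hpre']
    exact List.take_append_drop _ _
  have hA : gnomeSort dates tempfiles
      = ((gnomeLoopP (dates.zip tempfiles) 0).map Prod.fst,
         (gnomeLoopP (dates.zip tempfiles) 0).map Prod.snd ++ tempfiles.drop dates.length) := by
    rw [gnomeSort]
    have h := bridge (dates.zip tempfiles) (tempfiles.drop dates.length) 0
    rw [hfst, htf] at h
    exact h
  have hmain : gnomeLoopP (dates.zip tempfiles) 0 = (dates.zip tempfiles).foldl stepS [] := by
    have h := main_sim (dates.zip tempfiles) [] settled_nil
    simpa using h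
  have hB : (dates.zip tempfiles).foldl stepS []
      = ((dates.zip tempfiles).foldl bStep ([], [])).1
        ++ sortedRun ((dates.zip tempfiles).foldl bStep ([], [])).2 := by
    have h := b_sim (dates.zip tempfiles) [] []
      (by intro a ha; simp at ha) (by intro p hp; simp at hp)
    simpa [sortedRun] using h
  have hlenout : (((dates.zip tempfiles).foldl bStep ([], [])).1
        ++ sortedRun ((dates.zip tempfiles).foldl bStep ([], [])).2).length = dates.length := by
    have h := length_foldl_bStep (dates.zip tempfiles) [] []
    simp only [List.length_nil, List.length_zip] at h
    simp [sortedRun, PySem.List.length_sorted]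
    omega
  rw [hA, hmain, hB]
  simp only [gnomeSort_alt]
  rw [hlenout]
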